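-- pv_equiv track=rewrite | github.com/fblissjr/hfutils | src/hfutils/inspect/architecture.py | _detect_adapter
-- ===== SOURCE A (Python) =====
-- def _detect_adapter(names: list[str]) -> str | None:
--     """Detect adapter type from tensor naming patterns."""
--     has_lora_ab = any("lora_A" in n or "lora_B" in n for n in names)
--     has_lora_down_up = any("_lora.down" in n or "_lora.up" in n for n in names)
--     has_magnitude = any("magnitude_vector" in n or "dora_scale" in n for n in names)
--
--     if has_magnitude and (has_lora_ab or has_lora_down_up):
--         return "DoRA"
--     if has_lora_ab or has_lora_down_up:
--         return "LoRA"
--     return None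
-- ===== SOURCE B (Python) =====
-- def _detect_adapter(names: list[str]) -> str | None:
--     """Detect adapter type from tensor naming patterns (single pass)."""
--     has_lora_ab = has_lora_down_up = has_magnitude = False
--     for n in names:
--         has_lora_ab = has_lora_ab or "lora_A" in n or "lora_B" in n
--         has_lora_down_up = has_lora_down_up or "_lora.down" in n or "_lora.up" in n
--         has_magnitude = has_magnitude or "magnitude_vector" in n or "dora_scale" in n
--         if has_lora_ab and has_lora_down_up and has_magnitude:
--             break
--     if has_magnitude and (has_lora_ab or has_lora_down_up):
--         return "DoRA"
--     if has_lora_ab or has_lora_down_up: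
--         return "LoRA"
--     return None
-- ===== Notes on version B (the rewrite author's own statement) =====
-- stated objective: alternative
-- what changed: Three separate any() scans over names are replaced by a single pass maintaining three booleans with an early break once all are set; the final decision logic is unchanged.
import Mathlib
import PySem

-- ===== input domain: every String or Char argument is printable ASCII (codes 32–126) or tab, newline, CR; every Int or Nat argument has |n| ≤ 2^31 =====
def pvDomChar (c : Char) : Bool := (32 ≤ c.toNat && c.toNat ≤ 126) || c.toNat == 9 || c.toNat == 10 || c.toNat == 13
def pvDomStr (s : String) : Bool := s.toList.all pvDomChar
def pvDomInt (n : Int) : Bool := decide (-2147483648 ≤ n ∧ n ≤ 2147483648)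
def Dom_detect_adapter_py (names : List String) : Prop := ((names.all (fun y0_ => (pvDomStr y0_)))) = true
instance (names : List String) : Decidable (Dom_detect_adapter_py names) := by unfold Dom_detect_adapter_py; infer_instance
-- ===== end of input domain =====

-- ===== PORT A =====
def detect_adapter_py (names : List String) : Option String :=
  let has_lora_ab := names.any (fun n => PySem.Str.isIn "lora_A" n || PySem.Str.isIn "lora_B" n)
  let has_lora_down_up := names.any (fun n => PySem.Str.isIn "_lora.down" n || PySem.Str.isIn "_lora.up" n)
  let has_magnitude := names.any (fun n => PySem.Str.isIn "magnitude_vector" n || PySem.Str.isIn "dora_scale" n)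
  if has_magnitude && (has_lora_ab || has_lora_down_up) then some "DoRA"
  else if has_lora_ab || has_lora_down_up then some "LoRA"
  else none

-- B: one pass over names with three flags and an early break, instead of three any() scans (alternative decomposition, same cost).
-- ===== PORT B =====
-- single-pass loop with early break once all three flags are set (mirrors Source B's for-loop)
def detectLoop : List String → Bool → Bool → Bool → Bool × Bool × Bool
  | [], a, d, m => (a, d, m)
  | n :: rest, a, d, m =>
    let a := a || PySem.Str.isIn "lora_A" n || PySem.Str.isIn "lora_B" n
    let d := d || PySem.Str.isIn "_lora.down" n || PySem.Str.isIn "_lora.up" n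
    let m := m || PySem.Str.isIn "magnitude_vector" n || PySem.Str.isIn "dora_scale" n
    if a && d && m then (a, d, m) else detectLoop rest a d m

def detect_adapter_py_alt (names : List String) : Option String :=
  let r := detectLoop names false false false
  let has_lora_ab := r.1
  let has_lora_down_up := r.2.1
  let has_magnitude := r.2.2
  if has_magnitude && (has_lora_ab || has_lora_down_up) then some "DoRA"
  else if has_lora_ab || has_lora_down_up then some "LoRA"
  else none

-- ===== PRECONDITION & SPEC =====
def Spec_detect_adapter_py (names : List String) (out : Option String) : Prop := out = detect_adapter_py_alt names
instance (names : List String) (out : Option String) : Decidable (Spec_detect_adapter_py names out) := by unfold Spec_detect_adapter_py; infer_instance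

-- ===== CLAIM (what is proved, stated in full; the proofs are below) =====
def Claim_equal_detect_adapter_py : Prop := ∀ (names : List String), Dom_detect_adapter_py names → Spec_detect_adapter_py names (detect_adapter_py names)

-- ===== LEMMAS AND PROOFS =====

-- ===== VERDICT (by name: the statement is the Claim_ definition above) =====
lemma detectLoop_eq (names : List String) (a d m : Bool) :
    detectLoop names a d m =
      (a || names.any (fun n => PySem.Str.isIn "lora_A" n || PySem.Str.isIn "lora_B" n),
       d || names.any (fun n => PySem.Str.isIn "_lora.down" n || PySem.Str.isIn "_lora.up" n),
       m || names.any (fun n => PySem.Str.isIn "magnitude_vector" n || PySem.Str.isIn "dora_scale" n)) := by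
  induction names generalizing a d m with
  | nil => simp [detectLoop]
  | cons n rest ih =>
    simp only [detectLoop, List.any_cons]
    split
    · rename_i h
      simp only [Bool.and_eq_true] at h
      obtain ⟨⟨ha, hd⟩, hm⟩ := h
      simp only [PySem.Str.isIn_eq] at ha hd hm
      simp only [Prod.mk.injEq]
      refine ⟨?_, ?_, ?_⟩
      · simp only [PySem.Str.isIn_eq]; rw [ha]; symm; simp only [Bool.or_eq_true] at ha ⊢; tauto
      · simp only [PySem.Str.isIn_eq]; rw [hd]; symm; simp only [Bool.or_eq_true] at hd ⊢; tauto
      · simp only [PySem.Str.isIn_eq]; rw [hm]; symm; simp only [Bool.or_eq_true] at hm ⊢; tauto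
    · rw [ih]
      simp [Bool.or_assoc]

theorem detect_adapter_py_spec : Claim_equal_detect_adapter_py := by
  intro names _
  unfold Spec_detect_adapter_py detect_adapter_py detect_adapter_py_alt
  rw [detectLoop_eq]
  simp
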